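-- pv_equiv track=rewrite | github.com/chenxu0602/LeetCode | 1063.number-of-valid-subarrays.py | validSubarrays
-- ===== SOURCE A (Python) =====
-- from typing import List
--
-- def validSubarrays(nums: List[int]) -> int:
--
--     res, stack = 0, []
--     for n in nums:
--         while stack and stack[-1] > n:
--             stack.pop()
--         stack.append(n)
--         res += len(stack)
--     return res
-- ===== SOURCE B (Python) =====
-- from typing import List
--
-- def validSubarrays(nums: List[int]) -> int:
--     res = 0
--     n = len(nums)
--     for i in range(n):
--         j = i
--         while j < n and nums[j] >= nums[i]:
--             j += 1
--         res += j - i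
--     return res
-- ===== Notes on version B (the rewrite author's own statement) =====
-- stated objective: simpler
-- what changed: Replaces the monotonic stack with a direct nested scan: for each start index i, count forward while nums[j] >= nums[i]; no auxiliary stack is maintained.
import Mathlib
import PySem

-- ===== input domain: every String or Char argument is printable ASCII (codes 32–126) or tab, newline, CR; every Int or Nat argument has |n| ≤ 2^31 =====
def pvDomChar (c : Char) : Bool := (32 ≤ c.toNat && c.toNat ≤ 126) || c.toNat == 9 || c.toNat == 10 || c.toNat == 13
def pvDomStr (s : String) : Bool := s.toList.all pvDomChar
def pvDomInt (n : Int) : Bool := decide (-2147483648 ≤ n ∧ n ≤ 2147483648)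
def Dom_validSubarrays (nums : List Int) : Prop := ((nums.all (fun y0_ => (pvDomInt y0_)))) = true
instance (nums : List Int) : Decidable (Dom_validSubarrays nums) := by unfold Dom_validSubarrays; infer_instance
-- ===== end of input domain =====

-- B replaces A's monotonic stack by a direct per-start forward scan (simpler, no auxiliary stack); same results, O(n^2) worst case vs A's O(n).

-- ===== PORT A =====
-- stack is kept top-first: Python's `stack.append(n)` is cons, popping from the
-- end of the Python list is dropping from the head here.
def validSubarraysStep (st : Int × List Int) (n : Int) : Int × List Int :=
  -- while stack and stack[-1] > n: stack.pop()
  let s := st.2.dropWhile (fun t => decide (t > n))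
  -- stack.append(n)
  let s := n :: s
  -- res += len(stack)
  (st.1 + (s.length : Int), s)

def validSubarrays (nums : List Int) : Int :=
  (nums.foldl validSubarraysStep (0, [])).1

-- ===== PORT B =====
-- inner while loop of B: counts how many leading elements of the suffix are ≥ v
def scanLenB (v : Int) : List Int → Int
  | [] => 0
  | x :: xs => if v ≤ x then 1 + scanLenB v xs else 0

-- outer for-i loop of B: one term per start index (suffix)
def altGoB : List Int → Int
  | [] => 0
  | x :: xs => scanLenB x (x :: xs) + altGoB xs

def validSubarrays_alt (nums : List Int) : Int := altGoB nums

-- ===== PRECONDITION & SPEC =====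
def Spec_validSubarrays (nums : List Int) (out : Int) : Prop := out = validSubarrays_alt nums
instance (nums : List Int) (out : Int) : Decidable (Spec_validSubarrays nums out) := by unfold Spec_validSubarrays; infer_instance

-- ===== CLAIM (what is proved, stated in full; the proofs are below) =====
def Claim_equal_validSubarrays : Prop := ∀ (nums : List Int), Dom_validSubarrays nums → Spec_validSubarrays nums (validSubarrays nums)

-- ===== LEMMAS AND PROOFS =====

-- On a nonincreasing (top-first) stack, the pop-while is exactly a filter.
lemma dropWhile_eq_filter_of_sorted (n : Int) :
    ∀ (s : List Int), s.Pairwise (fun a b => b ≤ a) →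
      s.dropWhile (fun t => decide (t > n)) = s.filter (fun t => decide (t ≤ n)) := by
  intro s
  induction s with
  | nil => intro _; rfl
  | cons x xs ih =>
    intro hp
    rcases List.pairwise_cons.mp hp with ⟨hx, hxs⟩
    by_cases hxn : x > n
    · simp [List.dropWhile, List.filter, hxn, ih hxs, show ¬ x ≤ n by omega]
    · have hxle : x ≤ n := by omega
      have hall : xs.filter (fun t => decide (t ≤ n)) = xs := by
        apply List.filter_eq_self.mpr
        intro a ha
        have := hx a ha
        simp; omega
      simp [List.dropWhile, List.filter, hxle, hall, show ¬ x > n by omega]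

-- Main invariant of A's fold: the accumulated result plus, for each live stack
-- element, the length of its remaining run, equals B's count of the rest.
lemma loop_invariant :
    ∀ (rest : List Int) (res : Int) (s : List Int),
      s.Pairwise (fun a b => b ≤ a) →
      (rest.foldl validSubarraysStep (res, s)).1
        = res + altGoB rest + (s.map (fun e => scanLenB e rest)).sum := by
  intro rest
  induction rest with
  | nil => intro res s _; simp [altGoB, scanLenB]
  | cons n rest' ih =>
    intro res s hs
    have hdrop := dropWhile_eq_filter_of_sorted n s hs
    have hs' : (n :: s.filter (fun t => decide (t ≤ n))).Pairwise (fun a b => b ≤ a) := by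
      refine List.pairwise_cons.mpr ⟨?_, hs.filter _⟩
      intro a ha
      have := List.of_mem_filter ha
      simpa using this
    have hstep : validSubarraysStep (res, s) n
        = (res + ((n :: s.filter (fun t => decide (t ≤ n))).length : Int),
           n :: s.filter (fun t => decide (t ≤ n))) := by
      simp [validSubarraysStep, hdrop]
    rw [List.foldl_cons, hstep, ih _ _ hs']
    -- split both sides into matching pieces
    have hsum : ∀ (t : List Int), t.Pairwise (fun a b => b ≤ a) →
        ((t.filter (fun e => decide (e ≤ n))).length : Int)
          + ((t.filter (fun e => decide (e ≤ n))).map (fun e => scanLenB e rest')).sum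
        = (t.map (fun e => scanLenB e (n :: rest'))).sum := by
      intro t ht
      induction t with
      | nil => simp
      | cons x xs ihx =>
        rcases List.pairwise_cons.mp ht with ⟨_, hxs⟩
        have hrec := ihx hxs
        by_cases hx : x ≤ n
        · have hx1 : scanLenB x (n :: rest') = 1 + scanLenB x rest' := by
            simp [scanLenB, hx]
          simp only [List.filter_cons, hx, decide_true, if_true, List.map_cons,
            List.length_cons, List.sum_cons, hx1]
          push_cast
          push_cast at hrec
          omega
        · have hx0 : scanLenB x (n :: rest') = 0 := by
            simp [scanLenB, hx]
          simp only [List.filter_cons, hx, decide_false, Bool.false_eq_true, if_false,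
            List.map_cons, List.sum_cons, hx0]
          omega
    have hmain := hsum s hs
    simp only [altGoB, scanLenB, List.length_cons, List.map_cons, List.sum_cons, le_refl,
      if_true] at *
    push_cast
    omega

-- ===== VERDICT (by name: the statement is the Claim_ definition above) =====
theorem validSubarrays_spec : Claim_equal_validSubarrays := by
  intro nums _
  show validSubarrays nums = validSubarrays_alt nums
  have h := loop_invariant nums 0 [] (by simp)
  simpa [validSubarrays, validSubarrays_alt] using h
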